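-- pv_equiv track=rewrite | github.com/chris-p-schneider/tools-efl-coach | TEFLC/static/py/wordSearch.py | wordChars
-- ===== SOURCE A (Python) =====
-- def wordChars (vocabList):
-- 	longestWord = 0
-- 	totalWordChars = 0
-- 	wordCharsCounter = 0
-- 	while wordCharsCounter < len(vocabList):
-- 		totalWordChars = (totalWordChars + len(vocabList[wordCharsCounter]))
-- 		if len(vocabList[wordCharsCounter]) > longestWord:
-- 			longestWord = len(vocabList[wordCharsCounter])
-- 		wordCharsCounter += 1
-- 	return longestWord, totalWordChars
-- ===== SOURCE B (Python) =====
-- def wordChars(vocabList):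
--     # Divide and conquer: recursively split the index range in half,
--     # combining (longest, total) of the two halves with (max, +).
--     def go(lo, hi):
--         if hi <= lo:
--             return 0, 0
--         if hi - lo == 1:
--             n = len(vocabList[lo])
--             return n, n
--         mid = (lo + hi) // 2
--         l1, t1 = go(lo, mid)
--         l2, t2 = go(mid, hi)
--         return max(l1, l2), t1 + t2
--     return go(0, len(vocabList))
-- ===== Notes on version B (the rewrite author's own statement) =====
-- stated objective: alternative
-- what changed: Replaces A's single left-to-right counter loop fusing two accumulators with a recursive divide-and-conquer over the index range that computes (longest, total) for each half and merges them with (max, +); correctness rests on max and + being associative with identity 0.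
import Mathlib
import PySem

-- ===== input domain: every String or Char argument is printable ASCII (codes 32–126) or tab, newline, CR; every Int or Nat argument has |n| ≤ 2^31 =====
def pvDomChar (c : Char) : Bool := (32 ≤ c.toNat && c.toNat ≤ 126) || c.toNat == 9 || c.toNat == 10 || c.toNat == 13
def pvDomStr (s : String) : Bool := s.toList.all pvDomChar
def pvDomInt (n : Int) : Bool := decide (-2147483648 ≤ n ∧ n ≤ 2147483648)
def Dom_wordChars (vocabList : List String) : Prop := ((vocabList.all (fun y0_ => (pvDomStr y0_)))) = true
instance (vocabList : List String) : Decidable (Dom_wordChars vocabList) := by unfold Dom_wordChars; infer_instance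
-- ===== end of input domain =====

-- B replaces A's single counter-driven loop (two fused accumulators) with a recursive
-- divide-and-conquer over the index range, merging half-results with (max, +) — an
-- alternative decomposition of the same O(n) task.


-- ===== PORT A =====
-- while wordCharsCounter < len(vocabList): …  (counter-indexed loop, two fused accumulators)
def wordCharsGo (vocabList : List String) (longestWord totalWordChars : Int) (i : Nat) :
    Int × Int :=
  if h : i < vocabList.length then
    let totalWordChars' := totalWordChars + (vocabList[i].length : Int)
    let longestWord' :=
      if (vocabList[i].length : Int) > longestWord then (vocabList[i].length : Int)
      else longestWord
    wordCharsGo vocabList longestWord' totalWordChars' (i + 1)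
  else (longestWord, totalWordChars)
termination_by vocabList.length - i

def wordChars (vocabList : List String) : Int × Int :=
  wordCharsGo vocabList 0 0 0

-- ===== PORT B =====
-- def go(lo, hi): split the index range at mid = (lo+hi)//2, merge with (max, +)
def wcGoAlt (vocabList : List String) (lo hi : Nat) : Int × Int :=
  if hi ≤ lo then (0, 0)
  else if hi - lo = 1 then
    let n := ((vocabList.getD lo "").length : Int)
    (n, n)
  else
    let mid := (lo + hi) / 2
    let p1 := wcGoAlt vocabList lo mid
    let p2 := wcGoAlt vocabList mid hi
    (max p1.1 p2.1, p1.2 + p2.2)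
termination_by hi - lo
decreasing_by all_goals omega

def wordChars_alt (vocabList : List String) : Int × Int :=
  wcGoAlt vocabList 0 vocabList.length

-- ===== PRECONDITION & SPEC =====
def Spec_wordChars (vocabList : List String) (out : Int × Int) : Prop := out = wordChars_alt vocabList
instance (vocabList : List String) (out : Int × Int) : Decidable (Spec_wordChars vocabList out) := by unfold Spec_wordChars; infer_instance

-- ===== CLAIM (what is proved, stated in full; the proofs are below) =====
def Claim_equal_wordChars : Prop := ∀ (vocabList : List String), Dom_wordChars vocabList → Spec_wordChars vocabList (wordChars vocabList)

-- ===== LEMMAS AND PROOFS =====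

theorem foldl_add_shift (xs : List Int) (a : Int) :
    xs.foldl (· + ·) a = a + xs.foldl (· + ·) 0 := by
  induction xs generalizing a with
  | nil => simp
  | cons x xs ih =>
    simp only [List.foldl_cons]
    rw [ih (a + x), ih (0 + x)]
    ring

theorem foldl_max_shift (xs : List Int) (a b : Int) :
    xs.foldl max (max a b) = max a (xs.foldl max b) := by
  induction xs generalizing b with
  | nil => rfl
  | cons x xs ih =>
    simp only [List.foldl_cons]
    rw [max_assoc, ih]

theorem foldl_max_nonneg (xs : List Int) (a : Int) (h : 0 ≤ a) :
    0 ≤ xs.foldl max a := by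
  induction xs generalizing a with
  | nil => exact h
  | cons x xs ih => exact ih _ (le_max_of_le_left h)

theorem foldl_max_append (xs ys : List Int) (h : 0 ≤ xs.foldl max 0) :
    ys.foldl max (xs.foldl max 0) = max (xs.foldl max 0) (ys.foldl max 0) := by
  conv_lhs => rw [← max_eq_left h]
  rw [foldl_max_shift]

-- A's loop from index i equals the two straight folds over the remaining lengths.
theorem wordCharsGo_eq (vocabList : List String) (i : Nat) (l t : Int) :
    wordCharsGo vocabList l t i =
      (((vocabList.drop i).map (fun w => (w.length : Int))).foldl max l,
       t + ((vocabList.drop i).map (fun w => (w.length : Int))).foldl (· + ·) 0) := by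
  rw [wordCharsGo]
  by_cases h : i < vocabList.length
  · simp only [h, dif_pos]
    rw [wordCharsGo_eq vocabList (i + 1)]
    rw [List.drop_eq_getElem_cons h]
    simp only [List.map_cons, List.foldl_cons, Prod.mk.injEq]
    refine ⟨?_, ?_⟩
    · congr 1
      simp only [max_def]
      split_ifs <;> omega
    · rw [foldl_add_shift _ (0 + (vocabList[i].length : Int))]
      ring
  · simp [h, List.drop_eq_nil_of_le (Nat.le_of_not_lt h)]
termination_by vocabList.length - i

-- B's divide-and-conquer on [lo, hi) equals the folds over that slice's lengths.
theorem wcGoAlt_eq (vocabList : List String) (lo hi : Nat) (hhi : hi ≤ vocabList.length) :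
    wcGoAlt vocabList lo hi =
      ((((vocabList.drop lo).take (hi - lo)).map (fun w => (w.length : Int))).foldl max 0,
       (((vocabList.drop lo).take (hi - lo)).map (fun w => (w.length : Int))).foldl (· + ·) 0) := by
  rw [wcGoAlt]
  by_cases h0 : hi ≤ lo
  · simp [h0, Nat.sub_eq_zero_of_le h0]
  · by_cases h1 : hi - lo = 1
    · have hlo : lo < vocabList.length := by omega
      simp only [h0, if_false, h1, if_true]
      rw [List.drop_eq_getElem_cons hlo]
      simp only [List.take_succ_cons, List.take_zero, List.map_cons, List.map_nil,
        List.foldl_cons, List.foldl_nil, List.getD, List.getElem?_eq_getElem hlo,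
        Option.getD_some, zero_add]
      have : max 0 ((vocabList[lo].length : Int)) = (vocabList[lo].length : Int) :=
        max_eq_right (Int.natCast_nonneg _)
      rw [this]
    · simp only [h0, if_false, h1, if_false]
      have hm1 : lo < (lo + hi) / 2 := by omega
      have hm2 : (lo + hi) / 2 < hi := by omega
      rw [wcGoAlt_eq vocabList lo ((lo + hi) / 2) (by omega),
          wcGoAlt_eq vocabList ((lo + hi) / 2) hi hhi]
      have hsplit :
          (vocabList.drop lo).take (hi - lo) =
            (vocabList.drop lo).take ((lo + hi) / 2 - lo) ++
              (vocabList.drop ((lo + hi) / 2)).take (hi - (lo + hi) / 2) := by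
        have : vocabList.drop ((lo + hi) / 2) =
            (vocabList.drop lo).drop ((lo + hi) / 2 - lo) := by
          rw [List.drop_drop]
          congr 1
          omega
        rw [this, ← List.take_add]
        congr 1
        omega
      rw [hsplit, List.map_append, List.foldl_append, List.foldl_append]
      simp only [Prod.mk.injEq]
      exact ⟨(foldl_max_append _ _ (foldl_max_nonneg _ _ le_rfl)).symm,
             (foldl_add_shift _ _).symm⟩
termination_by hi - lo

-- ===== VERDICT (by name: the statement is the Claim_ definition above) =====
theorem wordChars_spec : Claim_equal_wordChars := by
  intro vocabList _
  unfold Spec_wordChars wordChars wordChars_alt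
  rw [wordCharsGo_eq, wcGoAlt_eq _ _ _ le_rfl]
  simp
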